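-- pv_equiv track=rewrite | github.com/iliaak/PhdPlayground | extArgExtraction.py | intifyFeatures
-- ===== SOURCE A (Python) =====
-- def intifyFeatures(f, d):
--
--     n = []
--     maxId = 0
--     for j in d:
--         if d[j] > maxId:
--             maxId = d[j]
--     maxId += 1
--     for x in f:
--         if x in d:
--             n.append(d[x])
--         else:
--             d[x] = maxId
--             n.append(maxId)
--             maxId += 1
--
--     return n, d
-- ===== SOURCE B (Python) =====
-- def intifyFeatures(f, d):
--     base = max([0] + list(d.values())) + 1
--     fresh = list(dict.fromkeys(x for x in f if x not in d))
--     d2 = dict(d)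
--     for i, x in enumerate(fresh):
--         d2[x] = base + i
--     n = [d2[x] for x in f]
--     return n, d2
-- ===== Notes on version B (the rewrite author's own statement) =====
-- stated objective: alternative
-- what changed: A's single fused loop (running maxId computed by per-key lookups, then appending ids and extending the dict in one pass) is replaced by a closed-form next-id (max over the values), an ordered-dedup pass (dict.fromkeys) that computes the fresh keys and their ids at once, and a separate projection pass building n by lookup.
import Mathlib
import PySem

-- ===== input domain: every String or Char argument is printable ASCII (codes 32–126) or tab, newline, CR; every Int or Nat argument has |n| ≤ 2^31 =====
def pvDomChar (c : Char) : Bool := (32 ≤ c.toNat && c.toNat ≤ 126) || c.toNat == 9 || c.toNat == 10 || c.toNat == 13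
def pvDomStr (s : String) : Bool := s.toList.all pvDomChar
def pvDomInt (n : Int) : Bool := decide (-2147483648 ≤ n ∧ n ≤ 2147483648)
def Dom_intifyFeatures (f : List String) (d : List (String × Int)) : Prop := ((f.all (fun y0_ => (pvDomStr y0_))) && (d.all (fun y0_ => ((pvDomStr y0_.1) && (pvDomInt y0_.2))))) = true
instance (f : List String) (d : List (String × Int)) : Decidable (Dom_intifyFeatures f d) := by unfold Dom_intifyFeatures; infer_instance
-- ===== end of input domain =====

-- B separates A's single fused loop into: a closed-form next-id (max over the values),
-- an ordered-dedup pass computing the fresh keys with their ids, and a projection pass;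
-- same return value (A mutates d in place, B builds a fresh dict — return values only).

-- d[x] on an association list: first match (shared dict primitive of both ports)
def pyLookup (d : List (String × Int)) (k : String) : Option Int :=
  (d.find? (fun p => p.1 == k)).map (fun p => p.2)

-- ===== PORT A =====
def intifyFeatures (f : List String) (d : List (String × Int)) : List Int × (List (String × Int)) :=
  -- n = []; maxId = 0; for j in d: if d[j] > maxId: maxId = d[j]
  let maxId0 : Int := (d.map (fun p => p.1)).foldl
    (fun m j => if (pyLookup d j).getD 0 > m then (pyLookup d j).getD 0 else m) 0
  -- maxId += 1
  let maxId := maxId0 + 1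
  -- for x in f: if x in d: n.append(d[x]) else: d[x] = maxId; n.append(maxId); maxId += 1
  let r := f.foldl
    (fun (s : List Int × List (String × Int) × Int) x =>
      match pyLookup s.2.1 x with
      | some v => (s.1 ++ [v], s.2.1, s.2.2)
      | none => (s.1 ++ [s.2.2], s.2.1 ++ [(x, s.2.2)], s.2.2 + 1))
    ([], d, maxId)
  (r.1, r.2.1)

-- ===== PORT B =====
def intifyFeatures_alt (f : List String) (d : List (String × Int)) : List Int × (List (String × Int)) :=
  -- base = max([0] + list(d.values())) + 1
  let base : Int := (PySem.List.max? ((0 : Int) :: d.map (fun p => p.2)) (fun y => y)).getD 0 + 1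
  -- fresh = list(dict.fromkeys(x for x in f if x not in d))
  let fresh := PySem.List.dedup (f.filter (fun x => (pyLookup d x).isNone))
  -- d2 = dict(d); for i, x in enumerate(fresh): d2[x] = base + i   (fresh keys are new and distinct, so each assignment appends)
  let d2 := d ++ (PySem.List.enumerate fresh 0).map (fun p => (p.2, base + p.1))
  -- n = [d2[x] for x in f]  (every x of f is a key of d2, so d2[x] never raises; getD 0 is unreachable)
  let n := f.map (fun x => (pyLookup d2 x).getD 0)
  (n, d2)

-- ===== PRECONDITION & SPEC =====
-- Pre_ excludes association lists d whose keys are not distinct: such a list does not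
-- represent a Python dict (Python collapses duplicate keys before the call), and the two
-- ports read a duplicate-key list differently (first-match lookup vs the set of values).
def Pre_intifyFeatures (f : List String) (d : List (String × Int)) : Prop :=
  (d.map (fun p => p.1)).Nodup
instance (f : List String) (d : List (String × Int)) : Decidable (Pre_intifyFeatures f d) := by
  unfold Pre_intifyFeatures; infer_instance

def pvWitness_intifyFeatures : List String × (List (String × Int)) :=
  (["a", "b", "a"], [("b", 2)])

def Spec_intifyFeatures (f : List String) (d : List (String × Int)) (out : List Int × (List (String × Int))) : Prop := out = intifyFeatures_alt f d
instance (f : List String) (d : List (String × Int)) (out : List Int × (List (String × Int))) : Decidable (Spec_intifyFeatures f d out) := by unfold Spec_intifyFeatures; infer_instance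

-- ===== CLAIM (what is proved, stated in full; the proofs are below) =====
def Claim_equal_intifyFeatures : Prop := ∀ (f : List String) (d : List (String × Int)), Dom_intifyFeatures f d → Pre_intifyFeatures f d → Spec_intifyFeatures f d (intifyFeatures f d)

-- ===== LEMMAS AND PROOFS =====

-- recursive form of A's second loop (proof device)
def gLoop : List String → List (String × Int) → Int → List Int × List (String × Int)
  | [], d, _ => ([], d)
  | x :: xs, d, m =>
    match pyLookup d x with
    | some v => let r := gLoop xs d m; (v :: r.1, r.2)
    | none => let r := gLoop xs (d ++ [(x, m)]) (m + 1); (m :: r.1, r.2)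

-- the fresh keys paired with consecutive ids starting at b
def pairsFrom : List String → Int → List (String × Int)
  | [], _ => []
  | x :: t, b => (x, b) :: pairsFrom t (b + 1)

theorem pyLookup_append (d t : List (String × Int)) (x : String) :
    pyLookup (d ++ t) x = (pyLookup d x).or (pyLookup t x) := by
  simp [pyLookup, List.find?_append]
  cases List.find? (fun p => p.1 == x) d <;> simp

theorem foldl_eq_gLoop (f : List String) :
    ∀ (acc : List Int) (d : List (String × Int)) (m : Int),
    f.foldl (fun (s : List Int × List (String × Int) × Int) x =>
      match pyLookup s.2.1 x with
      | some v => (s.1 ++ [v], s.2.1, s.2.2)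
      | none => (s.1 ++ [s.2.2], s.2.1 ++ [(x, s.2.2)], s.2.2 + 1)) (acc, d, m)
    = (acc ++ (gLoop f d m).1, (gLoop f d m).2, (f.foldl (fun (s : List Int × List (String × Int) × Int) x =>
      match pyLookup s.2.1 x with
      | some v => (s.1 ++ [v], s.2.1, s.2.2)
      | none => (s.1 ++ [s.2.2], s.2.1 ++ [(x, s.2.2)], s.2.2 + 1)) (acc, d, m)).2.2) := by
  induction f with
  | nil => intro acc d m; simp [gLoop]
  | cons x xs ih =>
    intro acc d m
    simp only [List.foldl_cons, gLoop]
    cases h : pyLookup d x with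
    | some v => rw [ih]; simp
    | none => rw [ih]; simp

theorem gLoop_append (f : List String) :
    ∀ (d : List (String × Int)) (m : Int), ∃ t, (gLoop f d m).2 = d ++ t := by
  induction f with
  | nil => intro d m; exact ⟨[], by simp [gLoop]⟩
  | cons x xs ih =>
    intro d m
    cases h : pyLookup d x with
    | some v =>
      obtain ⟨t, ht⟩ := ih d m
      exact ⟨t, by simp [gLoop, h, ht]⟩
    | none =>
      obtain ⟨t, ht⟩ := ih (d ++ [(x, m)]) (m + 1)
      exact ⟨[(x, m)] ++ t, by simp [gLoop, h, ht]⟩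

theorem gLoop_fst (f : List String) :
    ∀ (d : List (String × Int)) (m : Int),
    (gLoop f d m).1 = f.map (fun x => (pyLookup (gLoop f d m).2 x).getD 0) := by
  induction f with
  | nil => intro d m; simp [gLoop]
  | cons x xs ih =>
    intro d m
    cases h : pyLookup d x with
    | some v =>
      obtain ⟨t, ht⟩ := gLoop_append xs d m
      have hhead : (pyLookup (gLoop xs d m).2 x).getD 0 = v := by
        rw [ht, pyLookup_append, h]; simp
      simp only [gLoop, h, List.map_cons, hhead]
      rw [← ih d m]
    | none =>
      obtain ⟨t, ht⟩ := gLoop_append xs (d ++ [(x, m)]) (m + 1)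
      have hhead : (pyLookup (gLoop xs (d ++ [(x, m)]) (m + 1)).2 x).getD 0 = m := by
        rw [ht, pyLookup_append, pyLookup_append, h]
        simp [pyLookup]
      simp only [gLoop, h, List.map_cons, hhead]
      rw [← ih (d ++ [(x, m)]) (m + 1)]

-- ordered dedup via an explicit seen set (proof device for PySem.List.dedup)
def dedupSeen : List String → List String → List String
  | [], _ => []
  | a :: l, s => if PySem.Set.contains s a then dedupSeen l s else a :: dedupSeen l (s ++ [a])

theorem foldl_add_eq_dedupSeen (l : List String) :
    ∀ s : List String, List.foldl PySem.Set.add s l = s ++ dedupSeen l s := by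
  induction l with
  | nil => intro s; simp [dedupSeen]
  | cons a l ih =>
    intro s
    by_cases h : PySem.Set.contains s a = true
    · have hadd : PySem.Set.add s a = s := by unfold PySem.Set.add; rw [if_pos h]
      rw [List.foldl_cons, hadd, ih s]
      rw [dedupSeen, if_pos h]
    · have hadd : PySem.Set.add s a = s ++ [a] := by unfold PySem.Set.add; rw [if_neg h]
      rw [List.foldl_cons, hadd, ih (s ++ [a]), dedupSeen, if_neg h]
      simp

theorem dedupSeen_congr (l : List String) :
    ∀ s t : List String, (∀ y ∈ l, (y ∈ s ↔ y ∈ t)) → dedupSeen l s = dedupSeen l t := by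
  induction l with
  | nil => intro s t _; rfl
  | cons a l ih =>
    intro s t hst
    have ha := hst a (List.mem_cons_self)
    by_cases h : PySem.Set.contains s a = true
    · have has : a ∈ s := by simpa [PySem.Set.contains] using h
      have ht : PySem.Set.contains t a = true := by
        simp [PySem.Set.contains, ha.mp has]
      rw [dedupSeen, if_pos h, dedupSeen, if_pos ht]
      exact ih s t (fun y hy => hst y (List.mem_cons_of_mem a hy))
    · have has : a ∉ s := by simpa [PySem.Set.contains] using h
      have hat : a ∉ t := fun hmem => has (ha.mpr hmem)
      have ht : ¬ PySem.Set.contains t a = true := by simpa [PySem.Set.contains] using hat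
      rw [dedupSeen, if_neg h, dedupSeen, if_neg ht]
      congr 1
      apply ih
      intro y hy
      have := hst y (List.mem_cons_of_mem a hy)
      simp [this]

theorem dedupSeen_filter (l : List String) :
    ∀ (s : List String) (x : String), x ∈ s →
    dedupSeen l s = dedupSeen (l.filter (fun y => !(y == x))) s := by
  induction l with
  | nil => intro s x _; rfl
  | cons a l ih =>
    intro s x hx
    by_cases hax : a = x
    · subst hax
      have h : PySem.Set.contains s a = true := by simp [PySem.Set.contains, hx]
      rw [dedupSeen, if_pos h, List.filter_cons, if_neg (by simp)]
      exact ih s a hx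
    · rw [List.filter_cons, if_pos (by simp [hax])]
      by_cases h : PySem.Set.contains s a = true
      · rw [dedupSeen, if_pos h, dedupSeen, if_pos h]
        exact ih s x hx
      · rw [dedupSeen, if_neg h, dedupSeen, if_neg h]
        congr 1
        exact ih (s ++ [a]) x (List.mem_append_left _ hx)

theorem dedup_cons (x : String) (l : List String) :
    PySem.List.dedup (x :: l) = x :: PySem.List.dedup (l.filter (fun y => !(y == x))) := by
  have h0 : PySem.Set.add ([] : List String) x = [x] := by
    unfold PySem.Set.add; simp [PySem.Set.contains]
  simp only [PySem.List.dedup, PySem.Set.ofList, PySem.Set.empty, List.foldl_cons, h0]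
  rw [foldl_add_eq_dedupSeen l [x], foldl_add_eq_dedupSeen (l.filter (fun y => !(y == x))) []]
  rw [dedupSeen_filter l [x] x (List.mem_singleton.mpr rfl)]
  rw [dedupSeen_congr (l.filter (fun y => !(y == x))) [x] []
    (by intro y hy; have := List.of_mem_filter hy; simp at this ⊢; exact this)]
  simp

theorem gLoop_snd (f : List String) :
    ∀ (d : List (String × Int)) (m : Int),
    (gLoop f d m).2
      = d ++ pairsFrom (PySem.List.dedup (f.filter (fun x => (pyLookup d x).isNone))) m := by
  induction f with
  | nil => intro d m; simp [gLoop, PySem.List.dedup, PySem.Set.ofList, PySem.Set.empty, pairsFrom]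
  | cons x xs ih =>
    intro d m
    cases h : pyLookup d x with
    | some v =>
      have hfc : List.filter (fun y => (pyLookup d y).isNone) (x :: xs)
          = List.filter (fun y => (pyLookup d y).isNone) xs := by
        rw [List.filter_cons]; simp [h]
      simp only [gLoop, h, hfc]
      exact ih d m
    | none =>
      have hfc : List.filter (fun y => (pyLookup d y).isNone) (x :: xs)
          = x :: List.filter (fun y => (pyLookup d y).isNone) xs := by
        rw [List.filter_cons]; simp [h]
      simp only [gLoop, h, hfc]
      rw [ih (d ++ [(x, m)]) (m + 1), dedup_cons]
      have hfil : xs.filter (fun y => (pyLookup (d ++ [(x, m)]) y).isNone)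
          = (xs.filter (fun y => (pyLookup d y).isNone)).filter (fun y => !(y == x)) := by
        rw [List.filter_filter]
        apply List.filter_congr
        intro y _
        rw [pyLookup_append]
        cases hy : pyLookup d y with
        | some w => simp
        | none =>
          simp only [Option.or, Option.isNone_none]
          by_cases hxy : y = x
          · subst hxy; simp [pyLookup]
          · simp [pyLookup, hxy, Ne.symm hxy]
      rw [hfil]
      simp [pairsFrom, List.append_assoc]

-- the enumerate-built pairs are pairsFrom
theorem enum_pairs (xs : List String) :
    ∀ (s c : Int), (PySem.List.enumerate xs s).map (fun p => (p.2, c + p.1)) = pairsFrom xs (c + s) := by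
  induction xs with
  | nil => intro s c; simp [PySem.List.enumerate_nil, pairsFrom]
  | cons x t ih =>
    intro s c
    rw [PySem.List.enumerate_cons]
    simp only [List.map_cons, pairsFrom]
    have hc : c + (s + 1) = c + s + 1 := by ring
    rw [ih (s + 1) c, hc]

-- with distinct keys, d[j] over the keys reads exactly the values
theorem pyLookup_self (d : List (String × Int)) (hnd : (d.map (fun p => p.1)).Nodup) :
    ∀ p ∈ d, pyLookup d p.1 = some p.2 := by
  induction d with
  | nil => intro p hp; cases hp
  | cons q t ih =>
    intro p hp
    simp only [List.map_cons, List.nodup_cons] at hnd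
    cases hp with
    | head => simp [pyLookup]
    | tail _ hp =>
      have hne : q.1 ≠ p.1 := by
        intro he
        exact hnd.1 (he ▸ List.mem_map_of_mem hp)
      have := ih hnd.2 p hp
      simpa [pyLookup, hne] using this

theorem maxId_eq (d : List (String × Int)) (hnd : (d.map (fun p => p.1)).Nodup) :
    (d.map (fun p => p.1)).foldl
      (fun m j => if (pyLookup d j).getD 0 > m then (pyLookup d j).getD 0 else m) 0
    = (d.map (fun p => p.2)).foldl max 0 := by
  rw [List.foldl_map, List.foldl_map]
  apply PySem.List.foldl_congr_mem'
  intro p hp m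
  rw [pyLookup_self d hnd p hp]
  simp only [Option.getD_some]
  rw [max_def]
  split_ifs <;> omega

-- ===== VERDICT (by name: the statement is the Claim_ definition above) =====
theorem intifyFeatures_spec : Claim_equal_intifyFeatures := by
  intro f d _ hpre
  unfold Spec_intifyFeatures intifyFeatures intifyFeatures_alt
  rw [maxId_eq d hpre, PySem.List.max?_id_cons]
  simp only [Option.getD_some]
  rw [foldl_eq_gLoop]
  have hd2 : (gLoop f d ((d.map (fun p => p.2)).foldl max 0 + 1)).2
      = d ++ (PySem.List.enumerate (PySem.List.dedup (f.filter (fun x => (pyLookup d x).isNone))) 0).map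
          (fun p => (p.2, ((d.map (fun p => p.2)).foldl max 0 + 1) + p.1)) := by
    rw [gLoop_snd, enum_pairs]
    norm_num
  refine Prod.ext ?_ ?_
  · rw [gLoop_fst, hd2]; simp
  · simpa using hd2
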